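-- pv_equiv track=rewrite | github.com/Fiery-Warrior/Independent-Set-Algorithm | Current/gui.py | format_minimum_coverings
-- ===== SOURCE A (Python) =====
-- def format_minimum_coverings(min_coverings):
--     formatted_coverings = []
--     temp = set()
--     for covering in min_coverings:
--         if covering.startswith("Row"):
--             temp.add(covering)
--         else:
--             temp.add(covering.split()[1])
--             formatted_coverings.append(", ".join(sorted(temp)))
--             temp = set()
--     return formatted_coverings
-- ===== SOURCE B (Python) =====
-- def format_minimum_coverings(min_coverings):
--     # Repeatedly locate the FIRST non-"Row" terminator in the remaining
--     # suffix, emit the formatted group from the slice before it, and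
--     # continue on the suffix after it; a suffix with no terminator ends
--     # the loop (its Row items are dropped).
--     out = []
--     rest = min_coverings
--     while True:
--         i = next((k for k, c in enumerate(rest) if not c.startswith("Row")), -1)
--         if i < 0:
--             return out
--         out.append(", ".join(sorted({*rest[:i], rest[i].split()[1]})))
--         rest = rest[i + 1:]
-- ===== Notes on version B (the rewrite author's own statement) =====
-- stated objective: alternative
-- what changed: Replaced A's single forward pass that accumulates a running set and flushes it at each terminator by a find-and-slice loop: repeatedly locate the first non-'Row' terminator in the remaining suffix, format that group from the slice before it, and continue on the suffix after it.
import Mathlib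
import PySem

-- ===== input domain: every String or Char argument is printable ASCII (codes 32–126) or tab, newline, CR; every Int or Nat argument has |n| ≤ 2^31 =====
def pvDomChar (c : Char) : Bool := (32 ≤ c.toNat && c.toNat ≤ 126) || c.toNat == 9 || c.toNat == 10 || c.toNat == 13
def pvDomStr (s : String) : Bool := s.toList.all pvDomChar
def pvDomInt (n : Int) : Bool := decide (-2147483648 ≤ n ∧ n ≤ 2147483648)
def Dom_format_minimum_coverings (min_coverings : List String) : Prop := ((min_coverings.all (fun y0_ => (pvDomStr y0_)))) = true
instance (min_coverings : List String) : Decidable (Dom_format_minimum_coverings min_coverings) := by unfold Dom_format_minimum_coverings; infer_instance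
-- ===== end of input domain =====

-- B replaces A's accumulate-and-flush pass by repeated find-first-terminator-and-slice on the
-- remaining suffix (alternative decomposition, same cost).

-- covering.split()[1]; total form — Pre_ guarantees the index exists, so the default is never read inside Pre_
def fmcSecond (s : String) : String := (PySem.List.pyGet? (PySem.Str.split₀ s) 1).getD ""

-- ===== PORT A =====
def format_minimum_coverings (min_coverings : List String) : List String :=
  (min_coverings.foldl
    (fun (st : List String × PySem.Set String) covering =>
      if PySem.Str.startswith covering "Row" then
        (st.1, PySem.Set.add st.2 covering)
      else
        (st.1 ++ [PySem.Str.join ", "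
            (PySem.List.sorted (PySem.Set.add st.2 (fmcSecond covering)) (fun x => x) false)],
         PySem.Set.empty))
    ([], PySem.Set.empty)).1

-- ===== PORT B =====
-- ", ".join(sorted({*rows, t.split()[1]}))
def fmcEmit (rows : List String) (t : String) : String :=
  PySem.Str.join ", "
    (PySem.List.sorted (PySem.Set.add (PySem.Set.ofList rows) (fmcSecond t)) (fun x => x) false)

-- the while loop: find the first non-"Row" item, emit the group before it, continue after it
def fmcLoop (rest : List String) : List String :=
  match h : rest.findIdx? (fun c => !PySem.Str.startswith c "Row") with
  | none => []
  | some i => fmcEmit (rest.take i) (rest.getD i "") :: fmcLoop (rest.drop (i + 1))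
termination_by rest.length
decreasing_by
  cases rest with
  | nil => simp at h
  | cons a l => simp

def format_minimum_coverings_alt (min_coverings : List String) : List String :=
  fmcLoop min_coverings

-- ===== PRECONDITION & SPEC =====
-- Pre_ excludes exactly the inputs on which the Python A raises IndexError (B raises there too):
-- a non-"Row" item with fewer than two whitespace-separated tokens (covering.split()[1]).
def Pre_format_minimum_coverings (min_coverings : List String) : Prop :=
  (min_coverings.all (fun c =>
    PySem.Str.startswith c "Row" || decide (2 ≤ (PySem.Str.split₀ c).length))) = true
instance (min_coverings : List String) : Decidable (Pre_format_minimum_coverings min_coverings) := by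
  unfold Pre_format_minimum_coverings; infer_instance

def pvWitness_format_minimum_coverings : List String := ["Row 1", "Row 2", "Col 7", "End 3"]

def Spec_format_minimum_coverings (min_coverings : List String) (out : List String) : Prop := out = format_minimum_coverings_alt min_coverings
instance (min_coverings : List String) (out : List String) : Decidable (Spec_format_minimum_coverings min_coverings out) := by unfold Spec_format_minimum_coverings; infer_instance

-- ===== CLAIM (what is proved, stated in full; the proofs are below) =====
def Claim_equal_format_minimum_coverings : Prop := ∀ (min_coverings : List String), Dom_format_minimum_coverings min_coverings → Pre_format_minimum_coverings min_coverings → Spec_format_minimum_coverings min_coverings (format_minimum_coverings min_coverings)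

-- ===== LEMMAS AND PROOFS =====

-- fmcLoop on rest, but with the pending Row-run cur prepended to the first group
def fmcFromCur (cur rest : List String) : List String :=
  match rest.findIdx? (fun c => !PySem.Str.startswith c "Row") with
  | none => []
  | some i => fmcEmit (cur ++ rest.take i) (rest.getD i "") :: fmcLoop (rest.drop (i + 1))

lemma fmcFromCur_nil (rest : List String) : fmcFromCur [] rest = fmcLoop rest := by
  rw [fmcLoop]
  unfold fmcFromCur
  cases h : rest.findIdx? (fun c => !PySem.Str.startswith c "Row") <;> simp

lemma fmc_loop (rest : List String) (out cur : List String) :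
    (rest.foldl
      (fun (st : List String × PySem.Set String) covering =>
        if PySem.Str.startswith covering "Row" then
          (st.1, PySem.Set.add st.2 covering)
        else
          (st.1 ++ [PySem.Str.join ", "
              (PySem.List.sorted (PySem.Set.add st.2 (fmcSecond covering)) (fun x => x) false)],
           PySem.Set.empty))
      (out, PySem.Set.ofList cur)).1
    = out ++ fmcFromCur cur rest := by
  induction rest generalizing out cur with
  | nil => simp [fmcFromCur]
  | cons c rest ih =>
    simp only [List.foldl_cons]
    by_cases hc : PySem.Str.startswith c "Row" = true
    · simp only [hc, if_pos]
      rw [← PySem.Set.ofList_append_singleton, ih]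
      congr 1
      unfold fmcFromCur
      rw [List.findIdx?_cons]
      simp only [hc, Bool.not_true, Bool.false_eq_true, if_neg, not_false_iff]
      cases hr : rest.findIdx? (fun c => !PySem.Str.startswith c "Row") with
      | none => simp
      | some j => simp [fmcEmit, List.take_succ_cons]
    · simp only [hc, Bool.false_eq_true, if_neg, not_false_iff]
      have hc' : (!PySem.Str.startswith c "Row") = true := by rw [Bool.not_eq_true']; exact Bool.eq_false_iff.mpr hc
      have h2 : fmcFromCur cur (c :: rest) = fmcEmit cur c :: fmcLoop rest := by
        unfold fmcFromCur
        rw [List.findIdx?_cons, if_pos hc']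
        simp [fmcEmit]
      rw [h2, ← fmcFromCur_nil]
      have h3 := ih (out ++ [PySem.Str.join ", "
          (PySem.List.sorted (PySem.Set.add (PySem.Set.ofList cur) (fmcSecond c)) (fun x => x) false)]) []
      exact h3.trans (by simp [fmcEmit])

-- ===== VERDICT (by name: the statement is the Claim_ definition above) =====
theorem format_minimum_coverings_spec : Claim_equal_format_minimum_coverings := by
  intro mc _ _
  unfold Spec_format_minimum_coverings format_minimum_coverings format_minimum_coverings_alt
  have h := fmc_loop mc [] []
  rw [fmcFromCur_nil] at h
  exact h
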